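-- pv_equiv track=rewrite | github.com/natemago/adventofcode-2025 | day-3-lobby/solution.py | max_jolts
-- ===== SOURCE A (Python) =====
-- def max_jolts(bank):
--     res = 0
--
--     for i, a in enumerate(bank):
--         for b in bank[i+1:]:
--             jolts = a*10 + b
--             if jolts > res:
--                 res = jolts
--
--     return res
-- ===== SOURCE B (Python) =====
-- def max_jolts(bank):
--     # One backward pass: keep the max element seen so far (the best second
--     # digit for any earlier first digit) and combine with each element.
--     res = 0
--     best = None
--     for a in reversed(bank):
--         if best is not None:
--             cand = a * 10 + best
--             if cand > res:
--                 res = cand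
--         if best is None or a > best:
--             best = a
--     return res
-- ===== Notes on version B (the rewrite author's own statement) =====
-- stated objective: faster
-- what changed: Replaces the quadratic all-pairs scan with a single backward pass that maintains the running maximum of the suffix (the best second element for each first element).
import Mathlib
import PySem

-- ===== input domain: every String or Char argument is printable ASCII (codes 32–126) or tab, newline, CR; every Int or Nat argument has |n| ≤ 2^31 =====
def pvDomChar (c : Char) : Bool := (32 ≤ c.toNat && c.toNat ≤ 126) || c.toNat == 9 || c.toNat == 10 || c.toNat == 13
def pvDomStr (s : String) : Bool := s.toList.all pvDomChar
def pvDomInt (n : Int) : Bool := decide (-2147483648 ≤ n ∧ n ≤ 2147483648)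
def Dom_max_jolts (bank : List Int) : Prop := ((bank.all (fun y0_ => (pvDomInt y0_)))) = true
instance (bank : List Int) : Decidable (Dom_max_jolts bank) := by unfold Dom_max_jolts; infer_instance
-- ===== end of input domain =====

-- B replaces A's quadratic all-pairs scan by one backward pass with a running suffix maximum (faster, O(n)).

-- ===== PORT A =====
def max_jolts (bank : List Int) : Int :=
  (PySem.List.enumerate bank 0).foldl
    (fun res p =>
      (PySem.List.slice bank (some (p.1 + 1)) none).foldl
        (fun res b => if p.2 * 10 + b > res then p.2 * 10 + b else res) res)
    0

-- ===== PORT B =====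
def max_jolts_alt (bank : List Int) : Int :=
  (bank.reverse.foldl
    (fun (st : Int × Option Int) a =>
      let res :=
        match st.2 with
        | some best => if a * 10 + best > st.1 then a * 10 + best else st.1
        | none => st.1
      let best :=
        match st.2 with
        | none => a
        | some b => if a > b then a else b
      (res, some best))
    (0, none)).1

-- ===== PRECONDITION & SPEC =====
def Spec_max_jolts (bank : List Int) (out : Int) : Prop := out = max_jolts_alt bank
instance (bank : List Int) (out : Int) : Decidable (Spec_max_jolts bank out) := by unfold Spec_max_jolts; infer_instance

-- ===== CLAIM (what is proved, stated in full; the proofs are below) =====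
def Claim_equal_max_jolts : Prop := ∀ (bank : List Int), Dom_max_jolts bank → Spec_max_jolts bank (max_jolts bank)

-- ===== LEMMAS AND PROOFS =====

-- reference recursion: A's double loop, structurally
def pairsFold : List Int → Int → Int
  | [], r => r
  | a :: t, r => pairsFold t (t.foldl (fun r b => if a * 10 + b > r then a * 10 + b else r) r)

theorem if_gt_eq_max (x r : Int) : (if x > r then x else r) = max r x := by
  rw [max_def]; split_ifs <;> omega

theorem foldl_max_comm (t : List Int) : ∀ (c b : Int),
    t.foldl max (max c b) = max c (t.foldl max b) := by
  induction t with
  | nil => intro c b; simp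
  | cons x t ih =>
    intro c b
    simp only [List.foldl_cons]
    rw [max_assoc, ih]

theorem inner_max (t : List Int) (k : Int) : ∀ (r s : Int),
    t.foldl (fun r b => max r (k + b)) (max r s) = max r (t.foldl (fun r b => max r (k + b)) s) := by
  induction t with
  | nil => intro r s; simp
  | cons x t ih =>
    intro r s
    simp only [List.foldl_cons]
    rw [max_assoc, ih]

theorem pairsFold_max (l : List Int) : ∀ (r s : Int),
    pairsFold l (max r s) = max r (pairsFold l s) := by
  induction l with
  | nil => intro r s; simp [pairsFold]
  | cons a t ih =>
    intro r s
    simp only [pairsFold]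
    have h : (fun (r b : Int) => if a * 10 + b > r then a * 10 + b else r) = fun r b => max r (a * 10 + b) := by
      funext r b; exact if_gt_eq_max _ _
    rw [h, inner_max t (a * 10), ih]

theorem inner_eq (t : List Int) : ∀ (c r k : Int),
    (c :: t).foldl (fun r b => max r (k + b)) r = max r (k + t.foldl max c) := by
  induction t with
  | nil => intro c r k; simp
  | cons b t ih =>
    intro c r k
    simp only [List.foldl_cons] at *
    rw [ih b (max r (k + c)) k, foldl_max_comm, max_assoc]
    congr 1
    rw [← max_add_add_left]

-- A's fold over enumerate+slice equals the reference recursion on the suffix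
theorem foldA_eq_pairsFold (bank : List Int) : ∀ (l : List Int) (s : Nat) (res : Int),
    bank.drop s = l →
    (PySem.List.enumerate l (s : Int)).foldl
      (fun res p =>
        (PySem.List.slice bank (some (p.1 + 1)) none).foldl
          (fun res b => if p.2 * 10 + b > res then p.2 * 10 + b else res) res)
      res = pairsFold l res := by
  intro l
  induction l with
  | nil => intro s res _; simp [PySem.List.enumerate_nil, pairsFold]
  | cons a t ih =>
    intro s res hdrop
    have ht : bank.drop (s + 1) = t := by
      have := congrArg List.tail hdrop
      simpa [List.tail_drop] using this
    rw [PySem.List.enumerate_cons]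
    simp only [List.foldl_cons]
    have hslice : PySem.List.slice bank (some ((s : Int) + 1)) none = t := by
      have : ((s : Int) + 1) = ((s + 1 : Nat) : Int) := by push_cast; ring
      rw [this, PySem.List.slice_from_natCast, ht]
    rw [hslice]
    have : ((s : Int) + 1) = ((s + 1 : Nat) : Int) := by push_cast; ring
    rw [this, ih (s + 1) _ ht]
    rfl

-- running maximum of a list (B's `best` component)
def maxO : List Int → Option Int
  | [] => none
  | a :: t => some (t.foldl max a)

-- B's single-pass state, written as the foldr its reversed foldl computes
def bstep (st : Int × Option Int) (a : Int) : Int × Option Int :=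
  let res :=
    match st.2 with
    | some best => if a * 10 + best > st.1 then a * 10 + best else st.1
    | none => st.1
  let best :=
    match st.2 with
    | none => a
    | some b => if a > b then a else b
  (res, some best)

theorem pairsFold_cons_eq (a c : Int) (t : List Int) :
    pairsFold (a :: c :: t) 0 = max (pairsFold (c :: t) 0) (a * 10 + t.foldl max c) := by
  have h : (fun (r b : Int) => if a * 10 + b > r then a * 10 + b else r) = fun r b => max r (a * 10 + b) := by
    funext r b; exact if_gt_eq_max _ _
  show pairsFold (c :: t) ((c :: t).foldl (fun r b => if a * 10 + b > r then a * 10 + b else r) 0) = _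
  rw [h, inner_eq t c 0 (a * 10), max_comm (0 : Int), pairsFold_max, max_comm]

theorem binv (l : List Int) :
    l.foldr (fun a st => bstep st a) (0, none) = (pairsFold l 0, maxO l) := by
  induction l with
  | nil => simp [pairsFold, maxO]
  | cons a l ih =>
    simp only [List.foldr_cons, ih]
    cases l with
    | nil => simp [bstep, pairsFold, maxO]
    | cons c t =>
      have hbest : maxO (a :: c :: t) = some (max (t.foldl max c) a) := by
        simp only [maxO, List.foldl_cons]
        rw [foldl_max_comm, max_comm]
      rw [pairsFold_cons_eq, hbest]
      simp only [bstep, maxO, if_gt_eq_max]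

theorem max_jolts_eq (bank : List Int) : max_jolts bank = pairsFold bank 0 := by
  unfold max_jolts
  exact foldA_eq_pairsFold bank bank 0 0 rfl

theorem max_jolts_alt_eq (bank : List Int) : max_jolts_alt bank = pairsFold bank 0 := by
  unfold max_jolts_alt
  rw [List.foldl_reverse]
  change (List.foldr (fun a st => bstep st a) (0, none) bank).1 = pairsFold bank 0
  rw [binv]

-- ===== VERDICT (by name: the statement is the Claim_ definition above) =====
theorem max_jolts_spec : Claim_equal_max_jolts := by
  intro bank _
  unfold Spec_max_jolts
  rw [max_jolts_eq, max_jolts_alt_eq]
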